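-- pv_equiv track=rewrite | github.com/jamiexbarber/python_projects | data_structures/recursion.py | add_until_100
-- ===== SOURCE A (Python) =====
-- def add_until_100(array):
--     if len(array) == 1:
--         return array[0]
--     else:
--         total = add_until_100(array[1:])
--         if array[0] + total > 100:
--             return total
--         else:
--             return array[0] + total
-- ===== SOURCE B (Python) =====
-- def add_until_100(array):
--     total = array[-1]
--     for x in reversed(array[:-1]):
--         if x + total <= 100:
--             total += x
--     return total
-- ===== Notes on version B (the rewrite author's own statement) =====
-- stated objective: faster
-- what changed: Replaced the recursion that copies the tail with array[1:] at every level by a single right-to-left iterative pass with a running total, removing the O(n) slice per element.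
import Mathlib
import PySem

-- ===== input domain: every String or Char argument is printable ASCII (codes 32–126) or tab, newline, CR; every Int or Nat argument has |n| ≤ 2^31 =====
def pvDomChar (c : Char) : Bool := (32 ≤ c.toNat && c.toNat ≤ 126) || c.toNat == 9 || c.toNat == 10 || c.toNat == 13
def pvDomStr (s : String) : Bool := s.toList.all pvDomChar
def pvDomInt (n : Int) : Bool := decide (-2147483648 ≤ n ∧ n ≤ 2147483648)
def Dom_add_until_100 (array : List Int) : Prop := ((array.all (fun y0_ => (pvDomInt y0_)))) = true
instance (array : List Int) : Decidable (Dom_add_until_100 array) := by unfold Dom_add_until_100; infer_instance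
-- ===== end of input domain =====

-- B replaces A's slice-copying recursion by one right-to-left pass with a running total (faster, asymptotic).
-- ===== PORT A =====
def add_until_100 : List Int → Int
  | [] => 0            -- Python recurses forever on []; excluded by Pre_
  | [x] => x
  | x :: y :: ys =>
      let total := add_until_100 (y :: ys)
      if x + total > 100 then total else x + total

-- ===== PORT B =====
def add_until_100_alt (array : List Int) : Int :=
  match PySem.List.pyGet? array (-1) with      -- array[-1]; none = IndexError, excluded by Pre_
  | none => 0
  | some t =>
      ((PySem.List.slice array none (some (-1))).reverse).foldl
        (fun total x => if x + total ≤ 100 then total + x else total) t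

-- ===== PRECONDITION & SPEC =====
-- Pre_ excludes only the empty list, on which A hits unbounded recursion (RecursionError).
def Pre_add_until_100 (array : List Int) : Prop := array ≠ []
instance (array : List Int) : Decidable (Pre_add_until_100 array) := by unfold Pre_add_until_100; infer_instance
def pvWitness_add_until_100 : List Int := [1, 2]
def Spec_add_until_100 (array : List Int) (out : Int) : Prop := out = add_until_100_alt array
instance (array : List Int) (out : Int) : Decidable (Spec_add_until_100 array out) := by unfold Spec_add_until_100; infer_instance

-- ===== CLAIM (what is proved, stated in full; the proofs are below) =====
def Claim_equal_add_until_100 : Prop := ∀ (array : List Int), Dom_add_until_100 array → Pre_add_until_100 array → Spec_add_until_100 array (add_until_100 array)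

-- ===== LEMMAS AND PROOFS =====
theorem list_eq_append_singleton_of_ne_nil {α : Type} {l : List α} (h : l ≠ []) :
    ∃ ys z, l = ys ++ [z] := by
  rcases List.eq_nil_or_concat l with h' | ⟨ys, z, h'⟩
  · exact absurd h' h
  · exact ⟨ys, z, by simpa using h'⟩

theorem hcomb : (fun (x total : Int) => if x + total ≤ 100 then total + x else total)
    = (fun (x t : Int) => if x + t > 100 then t else x + t) := by
  funext x t
  split_ifs <;> omega

theorem A_foldr (ys : List Int) (z : Int) :
    add_until_100 (ys ++ [z]) = ys.foldr (fun x t => if x + t > 100 then t else x + t) z := by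
  induction ys with
  | nil => simp [add_until_100]
  | cons y ys ih =>
    cases hys : ys ++ [z] with
    | nil => simp at hys
    | cons a as =>
      rw [List.cons_append, hys]
      show (let total := add_until_100 (a :: as);
            if y + total > 100 then total else y + total) = _
      rw [← hys, ih, List.foldr_cons]

-- ===== VERDICT (by name: the statement is the Claim_ definition above) =====
theorem add_until_100_spec : Claim_equal_add_until_100 := by
  intro array _ hpre
  obtain ⟨ys, z, rfl⟩ := list_eq_append_singleton_of_ne_nil hpre
  unfold Spec_add_until_100 add_until_100_alt
  rw [PySem.List.pyGet?_neg_one_append_singleton, PySem.List.slice_to_neg_one,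
      List.dropLast_concat]
  show _ = List.foldl _ z ys.reverse
  rw [List.foldl_reverse, hcomb, A_foldr]
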